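-- pv_equiv track=rewrite | github.com/T0MY1206/proyecto-contadores | backend/bancos_extractos.py | detectar_banco_por_headers
-- ===== SOURCE A (Python) =====
-- from typing import Any, Dict, List
--
-- SIGNATURAS_BANCO: Dict[str, List[str]] = {
--     "santander": ["fecha valor", "f_extracto", "fecha comp"],
--     "provincia": ["fecha movimiento", "haber", "debe", "orden_pago", "nro_movimiento"],
-- }
--
-- def detectar_banco_por_headers(headers: List[str]) -> str | None:
--     """
--     Si los headers del Excel tienen columnas firma de un solo banco, devuelve su id.
--     Si coinciden con ambos o con ninguno, devuelve None (no se puede determinar).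
--     """
--     headers_lower = {str(h).strip().lower() for h in headers if h}
--     encontrados = []
--     for banco_id, signaturas in SIGNATURAS_BANCO.items():
--         if any(s in headers_lower for s in signaturas):
--             encontrados.append(banco_id)
--     if len(encontrados) == 1:
--         return encontrados[0]
--     return None
-- ===== SOURCE B (Python) =====
-- from typing import Any, Dict, List
--
-- SIGNATURAS_BANCO: Dict[str, List[str]] = {
--     "santander": ["fecha valor", "f_extracto", "fecha comp"],
--     "provincia": ["fecha movimiento", "haber", "debe", "orden_pago", "nro_movimiento"],
-- }
--
-- # inverted index: signature -> set of bank ids owning it (built once)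
-- _INDEX: Dict[str, set] = {}
-- for _banco, _sigs in SIGNATURAS_BANCO.items():
--     for _s in _sigs:
--         _INDEX.setdefault(_s, set()).add(_banco)
--
--
-- def detectar_banco_por_headers(headers: List[str]) -> str | None:
--     found: set = set()
--     for h in headers:
--         if h:
--             found |= _INDEX.get(str(h).strip().lower(), set())
--     if len(found) == 1:
--         return next(iter(found))
--     return None
-- ===== Notes on version B (the rewrite author's own statement) =====
-- stated objective: idiomatic
-- what changed: B builds an inverted index signature->set-of-banks once and makes a single pass over the headers, unioning the owning banks of each normalized header, instead of A's loop over banks with an inner scan of each bank's signatures against a header set.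
import Mathlib
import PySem

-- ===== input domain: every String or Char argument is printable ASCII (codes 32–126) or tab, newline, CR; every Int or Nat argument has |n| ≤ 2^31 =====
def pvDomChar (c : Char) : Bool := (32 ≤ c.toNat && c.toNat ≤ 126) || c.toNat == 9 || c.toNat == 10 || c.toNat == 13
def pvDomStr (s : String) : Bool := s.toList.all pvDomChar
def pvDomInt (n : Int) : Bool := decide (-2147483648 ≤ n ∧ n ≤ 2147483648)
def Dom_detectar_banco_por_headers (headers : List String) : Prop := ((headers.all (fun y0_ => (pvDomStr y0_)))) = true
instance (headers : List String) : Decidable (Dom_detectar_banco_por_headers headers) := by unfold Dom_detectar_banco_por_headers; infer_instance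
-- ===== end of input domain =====

-- B replaces A's loop over banks (with an inner scan of signatures against a header set) by a
-- precomputed inverted index signature -> set of owning banks and a single pass over the headers.

-- ===== PORT A =====
-- module-level constant SIGNATURAS_BANCO as its items list (insertion order)
def pvSignaturasBanco : List (String × List String) :=
  [("santander", ["fecha valor", "f_extracto", "fecha comp"]),
   ("provincia", ["fecha movimiento", "haber", "debe", "orden_pago", "nro_movimiento"])]

def detectar_banco_por_headers (headers : List String) : Option String :=
  let headers_lower : PySem.Set String :=
    PySem.Set.ofList ((headers.filter (fun h => h ≠ "")).map
      (fun h => PySem.Str.lower (PySem.Str.strip h)))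
  let encontrados : List String :=
    pvSignaturasBanco.foldl
      (fun acc p =>
        if p.2.any (fun s => PySem.Set.contains headers_lower s) then acc ++ [p.1] else acc) []
  if encontrados.length = 1 then encontrados[0]? else none

-- ===== PORT B =====
-- module-level inverted index: signature -> set of bank ids (setdefault(s, set()).add(banco))
def pvIndex : PySem.Dict String (PySem.Set String) :=
  pvSignaturasBanco.foldl
    (fun d p =>
      p.2.foldl (fun d s =>
        d.insert s (PySem.Set.add (d.getD s PySem.Set.empty) p.1)) d)
    PySem.Dict.empty

def detectar_banco_por_headers_alt (headers : List String) : Option String :=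
  let found : PySem.Set String :=
    headers.foldl
      (fun acc h =>
        if h ≠ "" then
          PySem.Set.union acc (pvIndex.getD (PySem.Str.lower (PySem.Str.strip h)) PySem.Set.empty)
        else acc)
      PySem.Set.empty
  match found with
  | [x] => some x
  | _ => none

-- ===== PRECONDITION & SPEC =====
def Spec_detectar_banco_por_headers (headers : List String) (out : Option String) : Prop := out = detectar_banco_por_headers_alt headers
instance (headers : List String) (out : Option String) : Decidable (Spec_detectar_banco_por_headers headers out) := by unfold Spec_detectar_banco_por_headers; infer_instance

-- ===== CLAIM (what is proved, stated in full; the proofs are below) =====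
def Claim_equal_detectar_banco_por_headers : Prop := ∀ (headers : List String), Dom_detectar_banco_por_headers headers → Spec_detectar_banco_por_headers headers (detectar_banco_por_headers headers)

-- ===== LEMMAS AND PROOFS =====

-- the two signature lists
def pvSigS : List String := ["fecha valor", "f_extracto", "fecha comp"]
def pvSigP : List String := ["fecha movimiento", "haber", "debe", "orden_pago", "nro_movimiento"]

lemma pvIndex_eval : pvIndex = PySem.Dict.mk
    [("fecha valor", ["santander"]), ("f_extracto", ["santander"]), ("fecha comp", ["santander"]),
     ("fecha movimiento", ["provincia"]), ("haber", ["provincia"]), ("debe", ["provincia"]),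
     ("orden_pago", ["provincia"]), ("nro_movimiento", ["provincia"])] := by decide

-- membership in the index lookup
lemma pvIdx_mem (s x : String) :
    x ∈ pvIndex.getD s PySem.Set.empty ↔
      (s ∈ pvSigS ∧ x = "santander") ∨ (s ∈ pvSigP ∧ x = "provincia") := by
  simp only [pvIndex_eval, PySem.Dict.getD, PySem.Dict.get?, PySem.Set.empty]
  by_cases h0 : ("fecha valor" : String) = s
  · subst h0; simp [pvSigS, pvSigP]
  rw [List.find?_cons_of_neg (by simp [beq_iff_eq, h0])]
  by_cases h1 : ("f_extracto" : String) = s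
  · subst h1; simp [pvSigS, pvSigP]
  rw [List.find?_cons_of_neg (by simp [beq_iff_eq, h1])]
  by_cases h2 : ("fecha comp" : String) = s
  · subst h2; simp [pvSigS, pvSigP]
  rw [List.find?_cons_of_neg (by simp [beq_iff_eq, h2])]
  by_cases h3 : ("fecha movimiento" : String) = s
  · subst h3; simp [pvSigS, pvSigP]
  rw [List.find?_cons_of_neg (by simp [beq_iff_eq, h3])]
  by_cases h4 : ("haber" : String) = s
  · subst h4; simp [pvSigS, pvSigP]
  rw [List.find?_cons_of_neg (by simp [beq_iff_eq, h4])]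
  by_cases h5 : ("debe" : String) = s
  · subst h5; simp [pvSigS, pvSigP]
  rw [List.find?_cons_of_neg (by simp [beq_iff_eq, h5])]
  by_cases h6 : ("orden_pago" : String) = s
  · subst h6; simp [pvSigS, pvSigP]
  rw [List.find?_cons_of_neg (by simp [beq_iff_eq, h6])]
  by_cases h7 : ("nro_movimiento" : String) = s
  · subst h7; simp [pvSigS, pvSigP]
  rw [List.find?_cons_of_neg (by simp [beq_iff_eq, h7])]
  simp_all [pvSigS, pvSigP, eq_comm]

lemma pvFold_mem (headers : List String) (acc : PySem.Set String) (x : String) :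
    x ∈ headers.foldl
      (fun acc h =>
        if h ≠ "" then
          PySem.Set.union acc (pvIndex.getD (PySem.Str.lower (PySem.Str.strip h)) PySem.Set.empty)
        else acc) acc
    ↔ x ∈ acc ∨ ∃ h ∈ headers, h ≠ "" ∧ x ∈ pvIndex.getD (PySem.Str.lower (PySem.Str.strip h)) PySem.Set.empty := by
  induction headers generalizing acc with
  | nil => simp
  | cons a t ih =>
    simp only [List.foldl_cons]
    by_cases ha : a = ""
    · subst ha
      rw [if_neg (fun k => k rfl), ih]
      constructor
      · rintro (h | ⟨hh, hm, hne, hx⟩)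
        · exact Or.inl h
        · exact Or.inr ⟨hh, List.mem_cons_of_mem _ hm, hne, hx⟩
      · rintro (h | ⟨hh, hm, hne, hx⟩)
        · exact Or.inl h
        · rcases List.mem_cons.mp hm with rfl | hm
          · exact absurd rfl hne
          · exact Or.inr ⟨hh, hm, hne, hx⟩
    · rw [if_pos ha, ih]
      simp only [PySem.Set.mem_union]
      constructor
      · rintro ((h | h) | ⟨hh, hm, hne, hx⟩)
        · exact Or.inl h
        · exact Or.inr ⟨a, List.mem_cons_self .., ha, h⟩
        · exact Or.inr ⟨hh, List.mem_cons_of_mem _ hm, hne, hx⟩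
      · rintro (h | ⟨hh, hm, hne, hx⟩)
        · exact Or.inl (Or.inl h)
        · rcases List.mem_cons.mp hm with rfl | hm
          · exact Or.inl (Or.inr hx)
          · exact Or.inr ⟨hh, hm, hne, hx⟩

lemma pvFold_nodup (headers : List String) (acc : PySem.Set String) (h : acc.Nodup) :
    (headers.foldl
      (fun acc h =>
        if h ≠ "" then
          PySem.Set.union acc (pvIndex.getD (PySem.Str.lower (PySem.Str.strip h)) PySem.Set.empty)
        else acc) acc).Nodup := by
  induction headers generalizing acc with
  | nil => exact h
  | cons a t ih =>
    simp only [List.foldl_cons]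
    split
    · exact ih _ (PySem.Set.nodup_union _ _ h)
    · exact ih _ h



-- Bool forms of "some non-empty header normalizes into this bank's signature list"
def pvPb (headers : List String) : Bool :=
  headers.any (fun h => h != "" && pvSigS.contains (PySem.Str.lower (PySem.Str.strip h)))
def pvQb (headers : List String) : Bool :=
  headers.any (fun h => h != "" && pvSigP.contains (PySem.Str.lower (PySem.Str.strip h)))

lemma pvPb_iff (headers : List String) :
    pvPb headers = true ↔ ∃ h ∈ headers, h ≠ "" ∧ PySem.Str.lower (PySem.Str.strip h) ∈ pvSigS := by
  simp [pvPb, List.any_eq_true]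

lemma pvQb_iff (headers : List String) :
    pvQb headers = true ↔ ∃ h ∈ headers, h ≠ "" ∧ PySem.Str.lower (PySem.Str.strip h) ∈ pvSigP := by
  simp [pvQb, List.any_eq_true]

lemma pvAny_iff (headers : List String) (l : List String) :
    (l.any (fun s => PySem.Set.contains
      (PySem.Set.ofList ((headers.filter (fun h => h ≠ "")).map
        (fun h => PySem.Str.lower (PySem.Str.strip h)))) s) = true) ↔
      ∃ h ∈ headers, h ≠ "" ∧ PySem.Str.lower (PySem.Str.strip h) ∈ l := by
  simp only [List.any_eq_true, PySem.Set.contains_iff, PySem.Set.mem_ofList, List.mem_map,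
    List.mem_filter, decide_eq_true_eq]
  constructor
  · rintro ⟨s, hsl, h, ⟨hm, hne⟩, rfl⟩
    exact ⟨h, hm, hne, hsl⟩
  · rintro ⟨h, hm, hne, hsl⟩
    exact ⟨_, hsl, h, ⟨hm, hne⟩, rfl⟩

lemma pvSingleton {l : List String} {s : String} (hn : l.Nodup)
    (hall : ∀ x ∈ l, x = s) (hs : s ∈ l) : l = [s] := by
  cases l with
  | nil => cases hs
  | cons a t =>
    have ha : a = s := hall a (by simp)
    subst ha
    cases t with
    | nil => rfl
    | cons b t' =>
      have hb : b = a := hall b (by simp)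
      subst hb
      simp at hn

lemma pvA_eval (headers : List String) :
    detectar_banco_por_headers headers =
      if pvPb headers then (if pvQb headers then none else some "santander")
      else if pvQb headers then some "provincia" else none := by
  unfold detectar_banco_por_headers
  have e1 : (pvSigS.any (fun s => PySem.Set.contains
      (PySem.Set.ofList ((headers.filter (fun h => h ≠ "")).map
        (fun h => PySem.Str.lower (PySem.Str.strip h)))) s)) = pvPb headers :=
    Bool.eq_iff_iff.mpr ((pvAny_iff headers pvSigS).trans (pvPb_iff headers).symm)
  have e2 : (pvSigP.any (fun s => PySem.Set.contains
      (PySem.Set.ofList ((headers.filter (fun h => h ≠ "")).map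
        (fun h => PySem.Str.lower (PySem.Str.strip h)))) s)) = pvQb headers :=
    Bool.eq_iff_iff.mpr ((pvAny_iff headers pvSigP).trans (pvQb_iff headers).symm)
  simp only [pvSigS, pvSigP] at e1 e2
  simp only [pvSignaturasBanco, List.foldl_cons, List.foldl_nil]
  rw [e1, e2]
  cases pvPb headers <;> cases pvQb headers <;> simp

lemma pvB_eval (headers : List String) :
    detectar_banco_por_headers_alt headers =
      if pvPb headers then (if pvQb headers then none else some "santander")
      else if pvQb headers then some "provincia" else none := by
  unfold detectar_banco_por_headers_alt
  have hmem : ∀ x, x ∈ headers.foldl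
      (fun acc h =>
        if h ≠ "" then
          PySem.Set.union acc (pvIndex.getD (PySem.Str.lower (PySem.Str.strip h)) PySem.Set.empty)
        else acc) PySem.Set.empty
      ↔ (x = "santander" ∧ pvPb headers = true) ∨ (x = "provincia" ∧ pvQb headers = true) := by
    intro x
    rw [pvFold_mem]
    simp only [pvIdx_mem]
    simp only [PySem.Set.empty, List.not_mem_nil, false_or, pvPb_iff, pvQb_iff]
    constructor
    · rintro ⟨h, hm, hne, (⟨hs, rfl⟩ | ⟨hs, rfl⟩)⟩
      · exact Or.inl ⟨rfl, h, hm, hne, hs⟩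
      · exact Or.inr ⟨rfl, h, hm, hne, hs⟩
    · rintro (⟨rfl, h, hm, hne, hs⟩ | ⟨rfl, h, hm, hne, hs⟩)
      · exact ⟨h, hm, hne, Or.inl ⟨hs, rfl⟩⟩
      · exact ⟨h, hm, hne, Or.inr ⟨hs, rfl⟩⟩
  have hnd := pvFold_nodup headers PySem.Set.empty List.nodup_nil
  set F := headers.foldl
      (fun acc h =>
        if h ≠ "" then
          PySem.Set.union acc (pvIndex.getD (PySem.Str.lower (PySem.Str.strip h)) PySem.Set.empty)
        else acc) PySem.Set.empty with hF
  clear_value F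
  by_cases h1 : pvPb headers = true <;> by_cases h2 : pvQb headers = true
  · -- both banks matched: F has two distinct members, never a singleton
    rw [h1, h2, if_pos rfl, if_pos rfl]
    have hs : "santander" ∈ F := (hmem _).mpr (Or.inl ⟨rfl, h1⟩)
    have hp : "provincia" ∈ F := (hmem _).mpr (Or.inr ⟨rfl, h2⟩)
    match F, hs, hp with
    | [x], hs, hp =>
      simp at hs hp
      subst hs
      exact absurd hp (by decide)
    | a :: b :: t, _, _ => rfl
  · rw [Bool.not_eq_true] at h2
    rw [h1, h2, if_pos rfl, if_neg (by decide)]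
    have : F = ["santander"] := by
      refine pvSingleton hnd ?_ ((hmem _).mpr (Or.inl ⟨rfl, h1⟩))
      intro x hx
      rcases (hmem x).mp hx with ⟨rfl, _⟩ | ⟨rfl, hq⟩
      · rfl
      · exact absurd hq (by simp [h2])
    rw [this]
  · rw [Bool.not_eq_true] at h1
    rw [h1, h2, if_neg (by decide), if_pos rfl]
    have : F = ["provincia"] := by
      refine pvSingleton hnd ?_ ((hmem _).mpr (Or.inr ⟨rfl, h2⟩))
      intro x hx
      rcases (hmem x).mp hx with ⟨rfl, hq⟩ | ⟨rfl, _⟩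
      · exact absurd hq (by simp [h1])
      · rfl
    rw [this]
  · rw [Bool.not_eq_true] at h1 h2
    rw [h1, h2, if_neg (by decide), if_neg (by decide)]
    have : F = [] := by
      rw [List.eq_nil_iff_forall_not_mem]
      intro x hx
      rcases (hmem x).mp hx with ⟨rfl, hq⟩ | ⟨rfl, hq⟩
      · exact absurd hq (by simp [h1])
      · exact absurd hq (by simp [h2])
    rw [this]

-- ===== VERDICT (by name: the statement is the Claim_ definition above) =====
theorem detectar_banco_por_headers_spec : Claim_equal_detectar_banco_por_headers := by
  intro headers _
  show detectar_banco_por_headers headers = detectar_banco_por_headers_alt headers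
  rw [pvA_eval, pvB_eval]
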